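-- pv_equiv track=rewrite | github.com/nishio/turing_complete | main/twotag_turing.py | get_initial_queue
-- ===== SOURCE A (Python) =====
-- def get_initial_queue(initial_state, left_tape, right_tape):
--     M = 0
--     for x in left_tape:
--         M *= 2
--         M += x
--     N = 0
--     for x in reversed(right_tape):
--         N *= 2
--         N += x
--
--     ax = "ax"
--     bx = "bx"
--     initial_queue = [
--         f"{c}_{initial_state}"
--         for c in f"Ax{ax * M}Bx{bx * N}"
--     ]
--     return initial_queue
-- ===== SOURCE B (Python) =====
-- def get_initial_queue(initial_state, left_tape, right_tape):
--     M = sum(x * 2 ** i for i, x in enumerate(reversed(left_tape)))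
--     N = sum(x * 2 ** i for i, x in enumerate(right_tape))
--     A_ = [f"A_{initial_state}", f"x_{initial_state}"]
--     a_ = [f"a_{initial_state}", f"x_{initial_state}"]
--     B_ = [f"B_{initial_state}", f"x_{initial_state}"]
--     b_ = [f"b_{initial_state}", f"x_{initial_state}"]
--     return A_ + a_ * M + B_ + b_ * N
-- ===== Notes on version B (the rewrite author's own statement) =====
-- stated objective: simpler
-- what changed: Replaces the two Horner accumulator loops by positional weighted sums (sum of x*2**i over enumerate), and builds the result list directly from replicated two-element blocks instead of constructing an intermediate string and comprehending over its characters.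
import Mathlib
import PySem

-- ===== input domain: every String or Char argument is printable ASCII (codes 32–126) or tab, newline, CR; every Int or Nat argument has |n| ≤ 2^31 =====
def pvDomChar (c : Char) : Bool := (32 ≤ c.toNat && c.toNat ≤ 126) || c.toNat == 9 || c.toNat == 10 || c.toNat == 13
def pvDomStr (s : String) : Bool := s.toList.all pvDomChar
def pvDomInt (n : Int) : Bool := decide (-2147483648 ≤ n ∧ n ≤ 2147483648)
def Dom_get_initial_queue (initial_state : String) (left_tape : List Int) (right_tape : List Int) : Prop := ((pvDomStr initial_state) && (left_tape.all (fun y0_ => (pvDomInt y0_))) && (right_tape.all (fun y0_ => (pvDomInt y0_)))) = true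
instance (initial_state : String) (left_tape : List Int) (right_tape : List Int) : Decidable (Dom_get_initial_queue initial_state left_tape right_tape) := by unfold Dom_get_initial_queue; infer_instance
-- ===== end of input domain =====

-- B replaces the Horner folds by positional weighted sums and assembles the output list
-- directly from replicated two-element blocks instead of iterating over an intermediate string.

-- ===== PORT A =====
-- literal port: Horner loops, then the string "Ax" ++ "ax"*M ++ "Bx" ++ "bx"*N (as a char list;
-- Python's str * n gives "" for n ≤ 0, matched by Int.toNat), then the comprehension f"{c}_{s}".
def get_initial_queue (initial_state : String) (left_tape : List Int) (right_tape : List Int) : List String :=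
  let M := left_tape.foldl (fun m x => m * 2 + x) 0
  let N := right_tape.reverse.foldl (fun n x => n * 2 + x) 0
  let ax := "ax".toList
  let bx := "bx".toList
  let s := "Ax".toList ++ (List.replicate M.toNat ax).flatten ++ "Bx".toList ++ (List.replicate N.toNat bx).flatten
  s.map (fun c => String.ofList (c :: '_' :: initial_state.toList))

-- ===== PORT B =====
-- literal port of Source B: weighted sums over enumerate (zipIdx), direct block assembly
-- (Python's list * n gives [] for n ≤ 0, matched by Int.toNat).
def get_initial_queue_alt (initial_state : String) (left_tape : List Int) (right_tape : List Int) : List String :=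
  let M := ((left_tape.reverse.zipIdx).map (fun p => p.1 * 2 ^ p.2)).sum
  let N := ((right_tape.zipIdx).map (fun p => p.1 * 2 ^ p.2)).sum
  let A_ := [String.ofList ('A' :: '_' :: initial_state.toList), String.ofList ('x' :: '_' :: initial_state.toList)]
  let a_ := [String.ofList ('a' :: '_' :: initial_state.toList), String.ofList ('x' :: '_' :: initial_state.toList)]
  let B_ := [String.ofList ('B' :: '_' :: initial_state.toList), String.ofList ('x' :: '_' :: initial_state.toList)]
  let b_ := [String.ofList ('b' :: '_' :: initial_state.toList), String.ofList ('x' :: '_' :: initial_state.toList)]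
  A_ ++ (List.replicate M.toNat a_).flatten ++ B_ ++ (List.replicate N.toNat b_).flatten

-- ===== PRECONDITION & SPEC =====
def Spec_get_initial_queue (initial_state : String) (left_tape : List Int) (right_tape : List Int) (out : List String) : Prop := out = get_initial_queue_alt initial_state left_tape right_tape
instance (initial_state : String) (left_tape : List Int) (right_tape : List Int) (out : List String) : Decidable (Spec_get_initial_queue initial_state left_tape right_tape out) := by unfold Spec_get_initial_queue; infer_instance

-- ===== CLAIM (what is proved, stated in full; the proofs are below) =====
def Claim_equal_get_initial_queue : Prop := ∀ (initial_state : String) (left_tape : List Int) (right_tape : List Int), Dom_get_initial_queue initial_state left_tape right_tape → Spec_get_initial_queue initial_state left_tape right_tape (get_initial_queue initial_state left_tape right_tape)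

-- ===== LEMMAS AND PROOFS =====

-- weighted sum with a starting index
theorem pv_wsum_append (m : List Int) (x : Int) (k : Nat) :
    (((m ++ [x]).zipIdx k).map (fun p => p.1 * 2 ^ p.2)).sum
      = ((m.zipIdx k).map (fun p => p.1 * 2 ^ p.2)).sum + x * 2 ^ (k + m.length) := by
  induction m generalizing k with
  | nil => simp [List.zipIdx]
  | cons y ys ih =>
      simp only [List.cons_append, List.zipIdx_cons, List.map_cons, List.sum_cons, ih (k + 1),
        List.length_cons]
      ring_nf

-- Horner fold equals the weighted sum of the reversed list
theorem pv_horner_eq (l : List Int) (a : Int) :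
    l.foldl (fun m x => m * 2 + x) a
      = a * 2 ^ l.length + ((l.reverse.zipIdx).map (fun p => p.1 * 2 ^ p.2)).sum := by
  induction l generalizing a with
  | nil => simp
  | cons y ys ih =>
      simp only [List.foldl_cons, List.reverse_cons, List.length_cons, ih (a * 2 + y),
        pv_wsum_append ys.reverse y 0, List.length_reverse]
      ring

-- ===== VERDICT (by name: the statement is the Claim_ definition above) =====
theorem get_initial_queue_spec : Claim_equal_get_initial_queue := by
  intro s lt rt _
  show get_initial_queue s lt rt = get_initial_queue_alt s lt rt
  unfold get_initial_queue get_initial_queue_alt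
  have hM : lt.foldl (fun m x => m * 2 + x) 0
      = ((lt.reverse.zipIdx).map (fun p => p.1 * 2 ^ p.2)).sum := by
    simpa using pv_horner_eq lt 0
  have hN : rt.reverse.foldl (fun n x => n * 2 + x) 0
      = ((rt.zipIdx).map (fun p => p.1 * 2 ^ p.2)).sum := by
    simpa using pv_horner_eq rt.reverse 0
  have hAx : "Ax".toList = ['A', 'x'] := by decide
  have hax : "ax".toList = ['a', 'x'] := by decide
  have hBx : "Bx".toList = ['B', 'x'] := by decide
  have hbx : "bx".toList = ['b', 'x'] := by decide
  simp only [hM, hN, hAx, hax, hBx, hbx]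
  simp [List.map_append, List.map_flatten, List.map_replicate]
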